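-- pv_equiv track=rewrite | github.com/gg-cyber172/PuyoPuyoTetrisAi | src/Tetris/aiTetrisScript.py | bumpinessAndTotalHeight
-- ===== SOURCE A (Python) =====
-- def bumpinessAndTotalHeight(board):
--     columnHeights=[]
--     bumpiness=0
--     totalHeight=0
--     for column in zip(*board):
--         i = 0
--         while i < len(board) and column[i] == 0:
--             i += 1
--         totalHeight+=len(board)-i
--         columnHeights.append(len(board)-i)
--     for i in range(len(columnHeights)-1):
--         bumpiness+=(abs(columnHeights[i]-columnHeights[i+1]))
--     return [totalHeight,bumpiness]
-- ===== SOURCE B (Python) =====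
-- def bumpinessAndTotalHeight(board):
--     # Row-major sweep: no transpose, no per-column rescans. heights[j] is set
--     # the first time a nonzero cell appears in column j (value = rows below incl.).
--     if not board:
--         return [0, 0]
--     n = len(board)
--     ncols = min(len(r) for r in board)
--     heights = [0] * ncols
--     for r, row in enumerate(board):
--         v = n - r
--         heights = [v if h == 0 and c != 0 else h for h, c in zip(heights, row)]
--     total = sum(heights)
--     bump = sum(abs(a - b) for a, b in zip(heights, heights[1:]))
--     return [total, bump]
-- ===== Notes on version B (the rewrite author's own statement) =====
-- stated objective: alternative
-- what changed: B sweeps the board row-major (no zip(*board) transpose and no per-column while loops): it fills a heights table the first time each column sees a nonzero cell, then sums it and its adjacent absolute differences.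
import Mathlib
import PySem

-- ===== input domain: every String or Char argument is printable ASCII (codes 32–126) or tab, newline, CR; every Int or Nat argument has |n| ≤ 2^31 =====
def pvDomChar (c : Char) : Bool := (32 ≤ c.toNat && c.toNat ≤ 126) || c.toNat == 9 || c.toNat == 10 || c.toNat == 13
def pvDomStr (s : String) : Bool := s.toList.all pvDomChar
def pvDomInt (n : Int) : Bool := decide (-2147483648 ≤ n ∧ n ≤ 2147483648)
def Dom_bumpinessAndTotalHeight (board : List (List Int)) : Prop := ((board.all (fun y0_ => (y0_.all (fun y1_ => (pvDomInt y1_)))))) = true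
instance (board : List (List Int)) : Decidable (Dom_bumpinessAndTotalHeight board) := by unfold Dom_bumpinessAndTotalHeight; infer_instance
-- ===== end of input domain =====

-- B replaces A's transpose + per-column scans + separate difference pass by a single row-major
-- sweep that fills a heights table incrementally ('alternative' objective; return value only).


-- ===== PORT A =====
-- zip(*board): one tuple per column index j < min row length; each tuple has one entry per row.
-- (the getD default is never used: j is below every row's length)
def pvColCount (board : List (List Int)) : Nat :=
  match board with
  | [] => 0
  | r :: rs => rs.foldl (fun m row => min m row.length) r.length

def pvZipStar (board : List (List Int)) : List (List Int) :=
  (List.range (pvColCount board)).map (fun j => board.map (fun row => row.getD j 0))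

-- the while loop 'i < len(board) and column[i] == 0': counts leading zeros
-- (column has exactly len(board) entries, so the bound check coincides with the list's end)
def pvLeadZeros : List Int → Nat
  | [] => 0
  | c :: rest => if c = 0 then 1 + pvLeadZeros rest else 0

def bumpinessAndTotalHeight (board : List (List Int)) : List Int :=
  let st := (pvZipStar board).foldl
    (fun (acc : Int × List Int) column =>
      let h : Int := (board.length : Int) - (pvLeadZeros column : Int)
      (acc.1 + h, acc.2 ++ [h]))
    (0, [])
  let totalHeight := st.1
  let columnHeights := st.2
  let bumpiness := (List.range (columnHeights.length - 1)).foldl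
    (fun b i => b + |columnHeights.getD i 0 - columnHeights.getD (i+1) 0|) 0
  [totalHeight, bumpiness]

-- ===== PORT B =====
-- min(len(r) for r in board) on a nonempty board
def pvMinLen (board : List (List Int)) : Nat :=
  match board with
  | [] => 0
  | r :: rs => rs.foldl (fun m row => min m row.length) r.length

-- the list comprehension [v if h == 0 and c != 0 else h for h, c in zip(heights, row)]
def pvStepRow (v : Int) (hs row : List Int) : List Int :=
  List.zipWith (fun h c => if h = 0 ∧ c ≠ 0 then v else h) hs row

def bumpinessAndTotalHeight_alt (board : List (List Int)) : List Int :=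
  if board = [] then [0, 0] else
  let n : Int := (board.length : Int)
  let ncols := pvMinLen board
  let heights := (PySem.List.enumerate board).foldl
    (fun hs (p : Int × List Int) => pvStepRow (n - p.1) hs p.2)
    (List.replicate ncols 0)
  let total := heights.sum
  let bump := (List.zipWith (fun a b => |a - b|) heights heights.tail).sum
  [total, bump]

-- ===== PRECONDITION & SPEC =====
def Spec_bumpinessAndTotalHeight (board : List (List Int)) (out : List Int) : Prop := out = bumpinessAndTotalHeight_alt board
instance (board : List (List Int)) (out : List Int) : Decidable (Spec_bumpinessAndTotalHeight board out) := by unfold Spec_bumpinessAndTotalHeight; infer_instance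

-- ===== CLAIM =====
def Claim_equal_bumpinessAndTotalHeight : Prop := ∀ (board : List (List Int)), Dom_bumpinessAndTotalHeight board → Spec_bumpinessAndTotalHeight board (bumpinessAndTotalHeight board)

-- ===== LEMMAS AND PROOFS =====

-- sum of adjacent absolute differences
def pairSum : List Int → Int
  | [] => 0
  | [_] => 0
  | x :: y :: t => |x - y| + pairSum (y :: t)

-- A's first loop computes (sum of heights, list of heights)
theorem foldA_eq (f : List Int → Int) (cols : List (List Int)) (t : Int) (l : List Int) :
    cols.foldl (fun (acc : Int × List Int) column => (acc.1 + f column, acc.2 ++ [f column])) (t, l)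
      = (t + (cols.map f).sum, l ++ cols.map f) := by
  induction cols generalizing t l with
  | nil => simp
  | cons x xs ih => simp [ih]; omega

-- fold over range = Finset sum
theorem foldl_range_sum (w : Nat → Int) (n : Nat) (b : Int) :
    (List.range n).foldl (fun b i => b + w i) b = b + ∑ i ∈ Finset.range n, w i := by
  induction n generalizing b with
  | zero => simp
  | succ n ih => rw [List.range_succ, List.foldl_append, ih, Finset.sum_range_succ]; simp; ring

-- the adjacent-difference sum over indices equals pairSum
theorem sum_pairSum : ∀ hs : List Int,
    ∑ i ∈ Finset.range (hs.length - 1), |hs.getD i 0 - hs.getD (i+1) 0| = pairSum hs := by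
  intro hs
  induction hs with
  | nil => simp [pairSum]
  | cons x t iht =>
    cases t with
    | nil => simp [pairSum]
    | cons y u =>
      have hlen : (x :: y :: u).length - 1 = ((y :: u).length - 1) + 1 := by simp
      rw [hlen, Finset.sum_range_succ']
      have h1 : ∀ i, ((x :: y :: u).getD (i+1) 0 : Int) = (y :: u).getD i 0 := by
        intro i; simp
      have h2 : (∑ i ∈ Finset.range ((y :: u).length - 1),
            |(x :: y :: u).getD (i+1) 0 - (x :: y :: u).getD (i+1+1) 0|)
          = ∑ i ∈ Finset.range ((y :: u).length - 1), |(y :: u).getD i 0 - (y :: u).getD (i+1) 0| := by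
        apply Finset.sum_congr rfl; intro i _; rw [h1, h1]
      rw [h2, iht]
      simp [pairSum]; ring

-- B's zip-adjacent sum is pairSum
theorem zip_pairSum : ∀ hs : List Int,
    (List.zipWith (fun a b => |a - b|) hs hs.tail).sum = pairSum hs := by
  intro hs
  induction hs with
  | nil => simp [pairSum]
  | cons x t ih =>
    cases t with
    | nil => simp [pairSum]
    | cons y u => simp only [List.tail_cons, List.zipWith, List.sum_cons, pairSum]
                  rw [← ih]; rfl

theorem pvMinLen_eq (board : List (List Int)) : pvMinLen board = pvColCount board := by
  cases board <;> rfl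

theorem foldl_min_le (rs : List (List Int)) (a : Nat) :
    rs.foldl (fun m row => min m row.length) a ≤ a ∧
    ∀ row ∈ rs, rs.foldl (fun m row => min m row.length) a ≤ row.length := by
  induction rs generalizing a with
  | nil => simp
  | cons x xs ih =>
    refine ⟨le_trans (ih (min a x.length)).1 (by omega), ?_⟩
    intro row hrow
    rcases List.mem_cons.mp hrow with h | h
    · subst h; exact le_trans (ih (min a row.length)).1 (by omega)
    · exact (ih (min a x.length)).2 row h

theorem minLen_le (board : List (List Int)) (row : List Int) (h : row ∈ board) :
    pvMinLen board ≤ row.length := by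
  cases board with
  | nil => cases h
  | cons x xs =>
    rcases List.mem_cons.mp h with h | h
    · subst h; exact le_trans (foldl_min_le xs row.length).1 (le_refl _)
    · exact (foldl_min_le xs x.length).2 row h

-- pointwise action of one row step
theorem stepRow_getElem (v : Int) (hs row : List Int) (j : Nat)
    (hj : j < hs.length) (hr : hs.length ≤ row.length) :
    (pvStepRow v hs row)[j]'(by simp [pvStepRow]; omega)
      = if hs[j] = 0 ∧ row[j]'(by omega) ≠ 0 then v else hs[j] := by
  simp [pvStepRow, List.getElem_zipWith]

theorem stepRow_length (v : Int) (hs row : List Int) (hr : hs.length ≤ row.length) :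
    (pvStepRow v hs row).length = hs.length := by
  simp [pvStepRow]; omega

-- length of the heights accumulator is preserved through the row fold
theorem foldRows_length (rows : List (List Int)) (n : Int) (s : Int) (hs : List Int)
    (hlen : ∀ row ∈ rows, hs.length ≤ row.length) :
    ((PySem.List.enumerate rows s).foldl
        (fun hs (p : Int × List Int) => pvStepRow (n - p.1) hs p.2) hs).length = hs.length := by
  induction rows generalizing s hs with
  | nil => simp [PySem.List.enumerate_nil]
  | cons r rs ih =>
    simp only [PySem.List.enumerate_cons, List.foldl_cons]
    have h1 : hs.length ≤ r.length := hlen r (by simp)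
    have h2 := stepRow_length (n - s) hs r h1
    rw [ih (s+1) _ (by rw [h2]; intro row hrow; exact hlen row (by simp [hrow]))]
    exact h2

-- pointwise characterization of the row fold: column j behaves like A's leading-zero count
theorem foldRows_getElem (rows : List (List Int)) (n : Int) (k : Int) (hs : List Int)
    (hlen : ∀ row ∈ rows, hs.length ≤ row.length)
    (j : Nat) (hj : j < hs.length)
    (hs0 : hs[j] = 0)
    (hk : k + rows.length ≤ n) :
    ((PySem.List.enumerate rows k).foldl
        (fun hs (p : Int × List Int) => pvStepRow (n - p.1) hs p.2) hs)[j]'(by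
          rw [foldRows_length rows n k hs hlen]; exact hj)
      = (if pvLeadZeros (rows.map (fun row => row.getD j 0)) = rows.length then 0
         else n - (k + (pvLeadZeros (rows.map (fun row => row.getD j 0)) : Int))) := by
  induction rows generalizing k hs with
  | nil => simpa [PySem.List.enumerate_nil, pvLeadZeros] using hs0
  | cons r rs ih =>
    simp only [PySem.List.enumerate_cons, List.foldl_cons]
    simp only [List.length_cons] at hk
    push_cast at hk
    have h1 : hs.length ≤ r.length := hlen r (by simp)
    have hlen' : ∀ row ∈ rs, (pvStepRow (n - k) hs r).length ≤ row.length := by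
      rw [stepRow_length _ _ _ h1]; intro row hrow; exact hlen row (by simp [hrow])
    have hjr : j < r.length := by omega
    have hget := stepRow_getElem (n - k) hs r j hj h1
    have hrd : r.getD j 0 = r[j] := by
      rw [List.getD_eq_getElem?_getD, List.getElem?_eq_getElem hjr]; rfl
    by_cases hc : r[j] = 0
    · -- still all zero in this column: recurse with k+1
      have hz : (pvStepRow (n - k) hs r)[j]'(by rw [stepRow_length _ _ _ h1]; exact hj) = 0 := by
        rw [hget]; simp [hc, hs0]
      rw [ih (k+1) (pvStepRow (n - k) hs r) hlen'
            (by rw [stepRow_length _ _ _ h1]; exact hj) hz (by omega)]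
      have hlz : pvLeadZeros ((r :: rs).map (fun row => row.getD j 0))
          = 1 + pvLeadZeros (rs.map (fun row => row.getD j 0)) := by
        simp only [List.map_cons, pvLeadZeros, hrd, hc]
        simp
      rw [hlz, List.length_cons]
      split_ifs <;> omega
    · -- first nonzero found at this row: height set to n - k, then untouched
      have hnz : (pvStepRow (n - k) hs r)[j]'(by rw [stepRow_length _ _ _ h1]; exact hj) = n - k := by
        rw [hget]; simp [hc, hs0]
      have hpos : n - k ≠ 0 := by omega
      -- the remaining fold never changes a nonzero entry at j
      have hrest : ∀ (rows' : List (List Int)) (s : Int) (hs' : List Int)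
          (hlen' : ∀ row ∈ rows', hs'.length ≤ row.length) (hj' : j < hs'.length),
          hs'[j] ≠ 0 →
          ((PySem.List.enumerate rows' s).foldl
            (fun hs (p : Int × List Int) => pvStepRow (n - p.1) hs p.2) hs')[j]'(by
              rw [foldRows_length rows' n s hs' hlen']; exact hj') = hs'[j] := by
        intro rows'
        induction rows' with
        | nil => intro s hs' _ _ _; simp [PySem.List.enumerate_nil]
        | cons q qs ihq =>
          intro s hs' hlen' hj' hne
          simp only [PySem.List.enumerate_cons, List.foldl_cons]
          have hq : hs'.length ≤ q.length := hlen' q (by simp)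
          have hkeep : (pvStepRow (n - s) hs' q)[j]'(by rw [stepRow_length _ _ _ hq]; exact hj') = hs'[j] := by
            rw [stepRow_getElem _ _ _ _ hj' hq]; simp [hne]
          rw [ihq (s+1) _ (by rw [stepRow_length _ _ _ hq]; intro row hrow; exact hlen' row (by simp [hrow]))
                (by rw [stepRow_length _ _ _ hq]; exact hj') (by rw [hkeep]; exact hne), hkeep]
      rw [hrest rs (k+1) _ hlen' (by rw [stepRow_length _ _ _ h1]; exact hj)
            (by rw [hnz]; exact hpos), hnz]
      have hlz : pvLeadZeros ((r :: rs).map (fun row => row.getD j 0)) = 0 := by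
        simp only [List.map_cons, pvLeadZeros, hrd]
        rw [if_neg hc]
      rw [hlz, List.length_cons, if_neg (by omega : ¬(0 = rs.length + 1))]
      simp

-- A's port unfolded to sum/pairSum over the heights of the columns
theorem A_closed (board : List (List Int)) :
    bumpinessAndTotalHeight board
      = [((pvZipStar board).map (fun c => (board.length : Int) - (pvLeadZeros c : Int))).sum,
         pairSum ((pvZipStar board).map (fun c => (board.length : Int) - (pvLeadZeros c : Int)))] := by
  unfold bumpinessAndTotalHeight
  rw [foldA_eq (fun c => (board.length : Int) - (pvLeadZeros c : Int)) (pvZipStar board) 0 []]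
  simp only [List.nil_append, zero_add]
  rw [foldl_range_sum, sum_pairSum]
  simp

-- B's heights list equals the map of column heights
theorem B_heights (board : List (List Int)) :
    ((PySem.List.enumerate board).foldl
        (fun hs (p : Int × List Int) => pvStepRow ((board.length : Int) - p.1) hs p.2)
        (List.replicate (pvMinLen board) 0))
      = (pvZipStar board).map (fun c => (board.length : Int) - (pvLeadZeros c : Int)) := by
  have hlen : ∀ row ∈ board, (List.replicate (pvMinLen board) (0:Int)).length ≤ row.length := by
    intro row hrow; rw [List.length_replicate]; exact minLen_le board row hrow
  apply List.ext_getElem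
  · rw [foldRows_length board (board.length : Int) 0 _ hlen]
    simp [pvZipStar, pvMinLen_eq]
  · intro j h1 h2
    have hj : j < (List.replicate (pvMinLen board) (0:Int)).length := by
      rw [foldRows_length board (board.length : Int) 0 _ hlen] at h1; exact h1
    have hmain := foldRows_getElem board (board.length : Int) 0 (List.replicate (pvMinLen board) 0)
      hlen j hj (by simp) (by simp)
    rw [hmain]
    have hjc : j < pvColCount board := by
      simpa [pvMinLen_eq] using hj
    have hcol : (pvZipStar board)[j]'(by simpa [pvZipStar] using hjc)
        = board.map (fun row => row.getD j 0) := by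
      simp [pvZipStar]
    rw [List.getElem_map, hcol]
    have hle : pvLeadZeros (board.map (fun row => row.getD j 0)) ≤ board.length := by
      have : ∀ cs : List Int, pvLeadZeros cs ≤ cs.length := by
        intro cs; induction cs with
        | nil => simp [pvLeadZeros]
        | cons c cr ih =>
          by_cases hc : c = 0
          · simp [pvLeadZeros, hc]; omega
          · simp [pvLeadZeros, hc]
      simpa using this (board.map (fun row => row.getD j 0))
    by_cases he : pvLeadZeros (board.map (fun row => row.getD j 0)) = board.length
    · rw [if_pos he, he]; simp
    · rw [if_neg he]; ring

theorem bump_agree (board : List (List Int)) :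
    bumpinessAndTotalHeight board = bumpinessAndTotalHeight_alt board := by
  by_cases hb : board = []
  · subst hb; rfl
  · unfold bumpinessAndTotalHeight_alt
    rw [if_neg hb]
    simp only []
    rw [B_heights board, zip_pairSum, A_closed board]

-- ===== VERDICT =====
theorem bumpinessAndTotalHeight_spec : Claim_equal_bumpinessAndTotalHeight := by
  intro board _
  unfold Spec_bumpinessAndTotalHeight
  exact bump_agree board
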